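-- pv_equiv track=rewrite | github.com/reyyishreyas/Xthelete_scheduler | python-backend/app/algorithms/grouping.py | calculate_group_penalty
-- ===== SOURCE A (Python) =====
-- from typing import List, Dict
--
-- def calculate_group_penalty(group: List[Dict]) -> int:
--     """Calculate penalty score for a group (same-club pairs)"""
--     club_counts = {}
--     penalty = 0
--
--     for player in group:
--         club_id = player['club_id']
--         count = club_counts.get(club_id, 0)
--         club_counts[club_id] = count + 1
--
--         # Each additional player from same club adds to penalty
--         if count > 0:
--             penalty += count
--
--     return penalty
-- ===== SOURCE B (Python) =====
-- def calculate_group_penalty(group):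
--     """Calculate penalty score for a group (same-club pairs)"""
--     counts = {}
--     for player in group:
--         c = player['club_id']
--         counts[c] = counts.get(c, 0) + 1
--     return sum(n * (n - 1) // 2 for n in counts.values())
-- ===== Notes on version B (the rewrite author's own statement) =====
-- stated objective: alternative
-- what changed: B tallies club sizes in one pass and then sums the closed-form pair count n*(n-1)//2 per club, instead of A's incremental per-insertion penalty accumulation.
import Mathlib
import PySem

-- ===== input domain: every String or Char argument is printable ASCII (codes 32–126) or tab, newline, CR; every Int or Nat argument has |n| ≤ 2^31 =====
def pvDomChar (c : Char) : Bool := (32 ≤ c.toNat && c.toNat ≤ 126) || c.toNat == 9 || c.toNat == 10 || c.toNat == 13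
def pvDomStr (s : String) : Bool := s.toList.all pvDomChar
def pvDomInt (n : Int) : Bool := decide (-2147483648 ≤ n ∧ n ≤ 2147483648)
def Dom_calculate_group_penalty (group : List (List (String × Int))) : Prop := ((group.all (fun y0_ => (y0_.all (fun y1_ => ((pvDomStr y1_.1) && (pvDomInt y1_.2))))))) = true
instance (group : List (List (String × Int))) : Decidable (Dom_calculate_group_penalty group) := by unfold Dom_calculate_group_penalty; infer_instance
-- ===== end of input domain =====

-- B replaces A's incremental per-insertion penalty accumulation by a club-size tally followed by the closed-form pair count n*(n-1)//2 per club.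

-- ===== PORT A =====
-- player['club_id'] : first match in the association list; the KeyError case (key absent) is excluded by Pre_, .getD 0 is never reached there
def calculate_group_penalty (group : List (List (String × Int))) : Int :=
  (group.foldl
    (fun (st : PySem.Dict Int Int × Int) player =>
      let club_id := ((PySem.Dict.mk player).get? "club_id").getD 0
      let count := st.1.getD club_id 0
      let club_counts := st.1.insert club_id (count + 1)
      let penalty := if count > 0 then st.2 + count else st.2
      (club_counts, penalty))
    (PySem.Dict.empty, 0)).2

-- ===== PORT B =====
def calculate_group_penalty_alt (group : List (List (String × Int))) : Int :=
  let counts := group.foldl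
    (fun (d : PySem.Dict Int Int) player =>
      let c := ((PySem.Dict.mk player).get? "club_id").getD 0
      d.insert c (d.getD c 0 + 1))
    PySem.Dict.empty
  (counts.values.map (fun n => PySem.Int.floordiv (n * (n - 1)) 2)).sum

-- ===== PRECONDITION & SPEC =====
-- Pre_ excludes exactly the inputs where Python A raises KeyError: a player dict without the 'club_id' key.
def Pre_calculate_group_penalty (group : List (List (String × Int))) : Prop :=
  ∀ player ∈ group, (PySem.Dict.mk player).contains "club_id" = true
instance (group : List (List (String × Int))) : Decidable (Pre_calculate_group_penalty group) := by unfold Pre_calculate_group_penalty; infer_instance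
def pvWitness_calculate_group_penalty : (List (List (String × Int))) := [[("club_id", 1)], [("club_id", 1), ("name", 7)], [("club_id", 2)]]

def Spec_calculate_group_penalty (group : List (List (String × Int))) (out : Int) : Prop := out = calculate_group_penalty_alt group
instance (group : List (List (String × Int))) (out : Int) : Decidable (Spec_calculate_group_penalty group out) := by unfold Spec_calculate_group_penalty; infer_instance

-- ===== CLAIM (what is proved, stated in full; the proofs are below) =====
def Claim_equal_calculate_group_penalty : Prop := ∀ (group : List (List (String × Int))), Dom_calculate_group_penalty group → Pre_calculate_group_penalty group → Spec_calculate_group_penalty group (calculate_group_penalty group)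

-- ===== LEMMAS AND PROOFS =====

-- the club id A and B both read from a player
def pvKey (player : List (String × Int)) : Int :=
  ((PySem.Dict.mk player).get? "club_id").getD 0

-- A's loop step, over club ids
def pvAstep (st : PySem.Dict Int Int × Int) (c : Int) : PySem.Dict Int Int × Int :=
  (st.1.insert c (st.1.getD c 0 + 1), if st.1.getD c 0 > 0 then st.2 + st.1.getD c 0 else st.2)

def pvTri (n : Int) : Int := PySem.Int.floordiv (n * (n - 1)) 2

def pvBval (cs : List Int) : Int :=
  ((PySem.Set.ofList cs).map (fun k => pvTri ((cs.count k : Int)))).sum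

lemma pvTri_succ (m : Nat) : pvTri ((m : Int) + 1) = pvTri (m : Int) + m := by
  unfold pvTri
  cases m with
  | zero => decide
  | succ k =>
    have h1 : ((k + 1 : Nat) : Int) + 1 = ((k + 2 : Nat) : Int) := by push_cast; ring
    have h2 : (((k + 2 : Nat) : Int)) * (((k + 2 : Nat) : Int) - 1) = (((k + 2) * (k + 1) : Nat) : Int) := by push_cast; ring
    have h3 : (((k + 1 : Nat) : Int)) * (((k + 1 : Nat) : Int) - 1) = (((k + 1) * k : Nat) : Int) := by push_cast; ring
    rw [h1, h2, h3, PySem.Int.floordiv_eq_ediv_of_pos (by norm_num),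
        PySem.Int.floordiv_eq_ediv_of_pos (by norm_num)]
    obtain ⟨r, hr⟩ := Nat.even_mul_succ_self k
    have hb : (k + 2) * (k + 1) = (k + 1) * k + 2 * (k + 1) := by ring
    have ha : (k + 1) * k = 2 * r := by rw [Nat.mul_comm]; omega
    rw [hb, ha]
    push_cast
    omega

lemma pvAfold_fst (cs : List Int) (d : PySem.Dict Int Int) (p : Int) :
    (cs.foldl pvAstep (d, p)).1 = cs.foldl (fun d c => d.insert c (d.getD c 0 + 1)) d := by
  induction cs generalizing d p with
  | nil => rfl
  | cons c t ih => simp [List.foldl_cons, pvAstep, ih]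

lemma pvSum_map_update {a : Int} (c : Int) (f g : Int → Int) :
    ∀ (S : List Int), S.Nodup → c ∈ S → (∀ k ∈ S, k ≠ c → g k = f k) → g c = f c + a →
    (S.map g).sum = (S.map f).sum + a := by
  intro S
  induction S with
  | nil => intro _ h; cases h
  | cons x t ih =>
    intro hnd hc hfg hgc
    rcases List.mem_cons.mp hc with hxc | hct
    · subst hxc
      have ht : ∀ k ∈ t, g k = f k := by
        intro k hk
        exact hfg k (List.mem_cons_of_mem _ hk) (fun hkc => (List.nodup_cons.mp hnd).1 (hkc ▸ hk))
      simp only [List.map_cons, List.sum_cons, hgc, List.map_congr_left ht]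
      ring
    · have hxne : x ≠ c := fun h => (List.nodup_cons.mp hnd).1 (h ▸ hct)
      have := ih (List.nodup_cons.mp hnd).2 hct (fun k hk => hfg k (List.mem_cons_of_mem _ hk)) hgc
      simp only [List.map_cons, List.sum_cons, this, hfg x (List.mem_cons_self) hxne]
      ring

lemma pvBval_append (cs : List Int) (c : Int) :
    pvBval (cs ++ [c]) = pvBval cs + cs.count c := by
  unfold pvBval
  have hset : PySem.Set.ofList (cs ++ [c]) = PySem.Set.add (PySem.Set.ofList cs) c := by
    rw [PySem.Set.ofList_eq_foldl, PySem.Set.ofList_eq_foldl, List.foldl_append]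
    rfl
  have hcount : ∀ k : Int, (cs ++ [c]).count k = cs.count k + if c = k then 1 else 0 := by
    intro k
    simp [List.count_append, List.count_singleton]
  by_cases hmem : c ∈ cs
  · have hadd : PySem.Set.add (PySem.Set.ofList cs) c = PySem.Set.ofList cs := by
      simp [PySem.Set.add, PySem.Set.contains, PySem.Set.mem_ofList, hmem]
    rw [hset, hadd]
    apply pvSum_map_update c (fun k => pvTri ((cs.count k : Int))) _ _
      (PySem.Set.nodup_ofList cs) ((PySem.Set.mem_ofList cs c).mpr hmem)
    · intro k hk hkc
      rw [hcount k, if_neg (fun h => hkc h.symm), Nat.add_zero]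
    · rw [hcount c, if_pos rfl]
      push_cast
      exact pvTri_succ (cs.count c)
  · have hadd : PySem.Set.add (PySem.Set.ofList cs) c = PySem.Set.ofList cs ++ [c] := by
      simp [PySem.Set.add, PySem.Set.contains, PySem.Set.mem_ofList, hmem]
    have hc0 : cs.count c = 0 := List.count_eq_zero.mpr hmem
    rw [hset, hadd]
    have hcongr : ∀ k ∈ PySem.Set.ofList cs,
        pvTri (((cs ++ [c]).count k : Int)) = pvTri ((cs.count k : Int)) := by
      intro k hk
      have hkc : c ≠ k := fun h => hmem (h ▸ (PySem.Set.mem_ofList cs k).mp hk)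
      rw [hcount k, if_neg hkc, Nat.add_zero]
    rw [List.map_append, List.sum_append, List.map_congr_left hcongr]
    simp [hc0, pvTri]

lemma pvAval_eq_pvBval (cs : List Int) :
    (cs.foldl pvAstep (PySem.Dict.empty, 0)).2 = pvBval cs := by
  induction cs using List.reverseRecOn with
  | nil => simp [pvBval, PySem.Set.ofList]
  | append_singleton t c ih =>
    rw [List.foldl_append, pvBval_append]
    simp only [List.foldl_cons, List.foldl_nil]
    have hfst := pvAfold_fst t PySem.Dict.empty 0
    have hcnt : (t.foldl pvAstep (PySem.Dict.empty, 0)).1.getD c 0 = (t.count c : Int) := by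
      rw [hfst, PySem.Dict.getD_foldl_insert_add_one]
      simp [PySem.Dict.getD_empty]
    show (if (t.foldl pvAstep (PySem.Dict.empty, 0)).1.getD c 0 > 0 then
            (t.foldl pvAstep (PySem.Dict.empty, 0)).2 + (t.foldl pvAstep (PySem.Dict.empty, 0)).1.getD c 0
          else (t.foldl pvAstep (PySem.Dict.empty, 0)).2) = pvBval t + t.count c
    rw [hcnt, ih]
    split <;> omega

lemma pvA_eq (group : List (List (String × Int))) :
    calculate_group_penalty group = ((group.map pvKey).foldl pvAstep (PySem.Dict.empty, 0)).2 := by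
  unfold calculate_group_penalty
  rw [List.foldl_map]
  rfl



lemma pvB_eq (group : List (List (String × Int))) :
    calculate_group_penalty_alt group = pvBval (group.map pvKey) := by
  unfold calculate_group_penalty_alt
  show (((group.foldl (fun (d : PySem.Dict Int Int) player =>
        d.insert (pvKey player) (d.getD (pvKey player) 0 + 1)) PySem.Dict.empty)).values.map
      (fun n => PySem.Int.floordiv (n * (n - 1)) 2)).sum = pvBval (group.map pvKey)
  have hfold : (group.foldl (fun (d : PySem.Dict Int Int) player =>
        d.insert (pvKey player) (d.getD (pvKey player) 0 + 1)) PySem.Dict.empty)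
      = PySem.Dict.counter (group.map pvKey) := by
    rw [← PySem.Dict.foldl_insert_getD_add_one_eq_counter, List.foldl_map]
  rw [hfold]
  show ((((PySem.Dict.counter (group.map pvKey)).items.map (·.2))).map
      (fun n => PySem.Int.floordiv (n * (n - 1)) 2)).sum = pvBval (group.map pvKey)
  rw [PySem.Dict.items_counter, List.map_map, List.map_map]
  rfl-- ===== VERDICT (by name: the statement is the Claim_ definition above) =====
theorem calculate_group_penalty_spec : Claim_equal_calculate_group_penalty := by
  intro group _ _
  show calculate_group_penalty group = calculate_group_penalty_alt group
  rw [pvA_eq, pvB_eq, pvAval_eq_pvBval]
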